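-- pv_equiv track=rewrite | github.com/Trungu/PRTS-BOT | tools/katex_formatter.py | _unwrap_macro_block
-- ===== SOURCE A (Python) =====
-- def _unwrap_macro_block(expr: str, macro: str) -> str:
--     r"""Replace ``\macro{...}`` with ``...`` while keeping the inner content."""
--     token = f"\\{macro}"
--     i = 0
--     out: list[str] = []
--
--     while i < len(expr):
--         if not expr.startswith(token, i):
--             out.append(expr[i])
--             i += 1
--             continue
--
--         j = i + len(token)
--         while j < len(expr) and expr[j].isspace():
--             j += 1
--         if j >= len(expr) or expr[j] != "{":
--             out.append(token)
--             i += len(token)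
--             continue
--
--         depth = 0
--         k = j
--         while k < len(expr):
--             ch = expr[k]
--             if ch == "{":
--                 depth += 1
--             elif ch == "}":
--                 depth -= 1
--                 if depth == 0:
--                     break
--             k += 1
--
--         if k >= len(expr) or depth != 0:
--             out.append(token)
--             i += len(token)
--             continue
--
--         inner = expr[j + 1 : k]
--         out.append(inner)
--         i = k + 1
--
--     return "".join(out)
-- ===== SOURCE B (Python) =====
-- def _match_brace(expr: str, j: int) -> int | None:
--     """Index of the brace matching expr[j] == '{', or None if unbalanced."""
--     depth = 0
--     for k in range(j, len(expr)):
--         ch = expr[k]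
--         if ch == "{":
--             depth += 1
--         elif ch == "}":
--             depth -= 1
--             if depth == 0:
--                 return k
--     return None
--
--
-- def _skip_ws(expr: str, j: int) -> int:
--     while j < len(expr) and expr[j].isspace():
--         j += 1
--     return j
--
--
-- def _unwrap_macro_block(expr: str, macro: str) -> str:
--     token = f"\\{macro}"
--     parts: list[str] = []
--     i = 0
--     while True:
--         p = expr.find(token, i)
--         if p < 0:
--             parts.append(expr[i:])
--             break
--         parts.append(expr[i:p])
--         j = _skip_ws(expr, p + len(token))
--         k = _match_brace(expr, j) if j < len(expr) and expr[j] == "{" else None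
--         if k is None:
--             parts.append(token)
--             i = p + len(token)
--         else:
--             parts.append(expr[j + 1 : k])
--             i = k + 1
--     return "".join(parts)
-- ===== Notes on version B (the rewrite author's own statement) =====
-- stated objective: faster
-- what changed: B replaces A's char-by-char outer while-loop (a startswith test and a one-character append at every index) by find-based jumps: expr.find(token, i) locates the next candidate in C, the untouched stretch expr[i:p] is emitted as one slice, and the whitespace-skip/brace-match is factored into helper functions returning an index or None.
import Mathlib
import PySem

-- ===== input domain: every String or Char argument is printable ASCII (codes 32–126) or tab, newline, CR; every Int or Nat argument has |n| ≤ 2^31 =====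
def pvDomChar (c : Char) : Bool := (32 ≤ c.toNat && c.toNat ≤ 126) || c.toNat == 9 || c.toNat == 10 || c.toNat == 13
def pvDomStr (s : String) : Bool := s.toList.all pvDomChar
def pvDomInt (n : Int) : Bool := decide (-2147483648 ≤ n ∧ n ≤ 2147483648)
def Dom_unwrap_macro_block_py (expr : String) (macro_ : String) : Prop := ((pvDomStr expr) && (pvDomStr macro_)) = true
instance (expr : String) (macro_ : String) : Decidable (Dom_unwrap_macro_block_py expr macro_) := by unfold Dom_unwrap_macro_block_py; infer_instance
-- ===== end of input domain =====

-- B replaces A's char-by-char outer scan by find-based jumps between token occurrences (same worst case, measurably faster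
-- in Python: C-level str.find and slice copies instead of a per-character interpreted loop).
-- Python slices expr[i:p] with 0 ≤ i ≤ p are ported exactly as (s.drop i).take (p - i); `expr.startswith(token, i)` with
-- 0 ≤ i ≤ len as PySem.Chars.startswith (s.drop i) token; both exact there. All loops are ported with a fuel argument that
-- only makes the recursion structural: every iteration advances the index by at least 1, so fuel s.length + 1 never runs out.

-- ===== PORT A =====
-- shared helper: the `while j < len(expr) and expr[j].isspace(): j += 1` loop (textually present in both A and B)
def pvSkipWs : Nat → List Char → Nat → Nat
  | 0, _, j => j
  | fuel + 1, s, j =>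
    if h : j < s.length then
      if PySem.Chars.isspace (s[j]'h) then pvSkipWs fuel s (j+1) else j
    else j

-- A's inner brace loop: returns (k, depth) at the `break` or at loop exhaustion
def pvBraceScan : Nat → List Char → Nat → Int → Nat × Int
  | 0, _, k, depth => (k, depth)
  | fuel + 1, s, k, depth =>
    if h : k < s.length then
      if (s[k]'h) = '{' then pvBraceScan fuel s (k+1) (depth+1)
      else if (s[k]'h) = '}' then
        if depth - 1 = 0 then (k, depth - 1) else pvBraceScan fuel s (k+1) (depth - 1)
      else pvBraceScan fuel s (k+1) depth
    else (k, depth)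

-- A's outer while-loop, char by char (token = tc :: tr, i.e. '\' followed by macro)
def pvUnwrapA : Nat → List Char → Char → List Char → Nat → List Char
  | 0, _, _, _, _ => []
  | fuel + 1, s, tc, tr, i =>
    if hi : i < s.length then
      if PySem.Chars.startswith (s.drop i) (tc :: tr) = true then
        if hj : pvSkipWs (s.length + 1) s (i + (tc :: tr).length) < s.length then
          if (s[pvSkipWs (s.length + 1) s (i + (tc :: tr).length)]'hj) = '{' then
            if (pvBraceScan (s.length + 1) s (pvSkipWs (s.length + 1) s (i + (tc :: tr).length)) 0).1 < s.length ∧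
               (pvBraceScan (s.length + 1) s (pvSkipWs (s.length + 1) s (i + (tc :: tr).length)) 0).2 = 0 then
              (s.drop (pvSkipWs (s.length + 1) s (i + (tc :: tr).length) + 1)).take
                  ((pvBraceScan (s.length + 1) s (pvSkipWs (s.length + 1) s (i + (tc :: tr).length)) 0).1
                    - (pvSkipWs (s.length + 1) s (i + (tc :: tr).length) + 1)) ++
                pvUnwrapA fuel s tc tr ((pvBraceScan (s.length + 1) s (pvSkipWs (s.length + 1) s (i + (tc :: tr).length)) 0).1 + 1)
            else (tc :: tr) ++ pvUnwrapA fuel s tc tr (i + (tc :: tr).length)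
          else (tc :: tr) ++ pvUnwrapA fuel s tc tr (i + (tc :: tr).length)
        else (tc :: tr) ++ pvUnwrapA fuel s tc tr (i + (tc :: tr).length)
      else (s[i]'hi) :: pvUnwrapA fuel s tc tr (i + 1)
    else []

def unwrap_macro_block_py (expr : String) (macro_ : String) : String :=
  String.mk (pvUnwrapA (expr.toList.length + 1) expr.toList '\\' macro_.toList 0)

-- ===== PORT B =====
-- B's brace matcher: index of the matching '}' or none (port of _match_brace)
def pvMatchBrace : Nat → List Char → Nat → Int → Option Nat
  | 0, _, _, _ => none
  | fuel + 1, s, k, depth =>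
    if h : k < s.length then
      if (s[k]'h) = '{' then pvMatchBrace fuel s (k+1) (depth+1)
      else if (s[k]'h) = '}' then
        if depth - 1 = 0 then some k else pvMatchBrace fuel s (k+1) (depth - 1)
      else pvMatchBrace fuel s (k+1) depth
    else none

-- B's outer loop: jump to the next occurrence via expr.find(token, i) (PySem.Chars.findFrom)
def pvUnwrapB : Nat → List Char → Char → List Char → Nat → List Char
  | 0, _, _, _, _ => []
  | fuel + 1, s, tc, tr, i =>
    if PySem.Chars.findFrom s (tc :: tr) (i : Int) none < 0 then s.drop i
    else
      (s.drop i).take ((PySem.Chars.findFrom s (tc :: tr) (i : Int) none).toNat - i) ++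
      match (if hj : pvSkipWs (s.length + 1) s ((PySem.Chars.findFrom s (tc :: tr) (i : Int) none).toNat + (tc :: tr).length) < s.length then
               (if (s[pvSkipWs (s.length + 1) s ((PySem.Chars.findFrom s (tc :: tr) (i : Int) none).toNat + (tc :: tr).length)]'hj) = '{' then
                  pvMatchBrace (s.length + 1) s (pvSkipWs (s.length + 1) s ((PySem.Chars.findFrom s (tc :: tr) (i : Int) none).toNat + (tc :: tr).length)) 0
                else none)
             else none) with
      | none => (tc :: tr) ++ pvUnwrapB fuel s tc tr ((PySem.Chars.findFrom s (tc :: tr) (i : Int) none).toNat + (tc :: tr).length)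
      | some k =>
          (s.drop (pvSkipWs (s.length + 1) s ((PySem.Chars.findFrom s (tc :: tr) (i : Int) none).toNat + (tc :: tr).length) + 1)).take
              (k - (pvSkipWs (s.length + 1) s ((PySem.Chars.findFrom s (tc :: tr) (i : Int) none).toNat + (tc :: tr).length) + 1)) ++
            pvUnwrapB fuel s tc tr (k + 1)

def unwrap_macro_block_py_alt (expr : String) (macro_ : String) : String :=
  String.mk (pvUnwrapB (expr.toList.length + 1) expr.toList '\\' macro_.toList 0)

-- ===== PRECONDITION & SPEC =====
def Spec_unwrap_macro_block_py (expr : String) (macro_ : String) (out : String) : Prop := out = unwrap_macro_block_py_alt expr macro_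
instance (expr : String) (macro_ : String) (out : String) : Decidable (Spec_unwrap_macro_block_py expr macro_ out) := by unfold Spec_unwrap_macro_block_py; infer_instance

-- ===== CLAIM (what is proved, stated in full; the proofs are below) =====
def Claim_equal_unwrap_macro_block_py : Prop := ∀ (expr : String) (macro_ : String), Dom_unwrap_macro_block_py expr macro_ → Spec_unwrap_macro_block_py expr macro_ (unwrap_macro_block_py expr macro_)

-- ===== LEMMAS AND PROOFS =====

theorem pvSkipWs_ge (fuel : Nat) (s : List Char) (j : Nat) : j ≤ pvSkipWs fuel s j := by
  fun_induction pvSkipWs fuel s j <;> omega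

theorem pvBraceScan_ge (fuel : Nat) (s : List Char) (k : Nat) (depth : Int) :
    k ≤ (pvBraceScan fuel s k depth).1 := by
  fun_induction pvBraceScan fuel s k depth <;> omega

-- the two brace matchers agree (given enough fuel)
theorem pvMatchBrace_eq (fuel : Nat) (s : List Char) (k : Nat) (depth : Int)
    (hfuel : s.length - k < fuel) :
    pvMatchBrace fuel s k depth =
      if (pvBraceScan fuel s k depth).1 < s.length ∧ (pvBraceScan fuel s k depth).2 = 0
      then some (pvBraceScan fuel s k depth).1 else none := by
  fun_induction pvBraceScan fuel s k depth with
  | case1 => omega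
  | case2 fuel s k d h h1 ih =>
      rw [pvMatchBrace]; simp [h, h1]
      exact ih (by omega)
  | case3 fuel s k d h h1 h2 h3 =>
      rw [pvMatchBrace]; simp [h, h2, h3]
  | case4 fuel s k d h h1 h2 h3 ih =>
      rw [pvMatchBrace]; simp [h, h2, h3]
      exact ih (by omega)
  | case5 fuel s k d h h1 h2 ih =>
      rw [pvMatchBrace]; simp [h, h1, h2]
      exact ih (by omega)
  | case6 fuel s k d h =>
      rw [pvMatchBrace]; simp [h]

-- A's loop does not depend on the fuel once the fuel exceeds the remaining length
theorem pvUnwrapA_congr (s : List Char) (tc : Char) (tr : List Char) :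
    ∀ n m i, s.length - i < n → s.length - i < m →
      pvUnwrapA n s tc tr i = pvUnwrapA m s tc tr i := by
  intro n
  induction n with
  | zero => intro m i h _; omega
  | succ n ih =>
      intro m i hn hm
      cases m with
      | zero => omega
      | succ m =>
        rw [pvUnwrapA, pvUnwrapA]
        by_cases hi : i < s.length
        · simp only [dif_pos hi]
          have htl : 1 ≤ (tc :: tr).length := by simp
          by_cases hsw : PySem.Chars.startswith (s.drop i) (tc :: tr) = true
          · simp only [if_pos hsw]
            have hjge := pvSkipWs_ge (s.length + 1) s (i + (tc :: tr).length)
            by_cases hj : pvSkipWs (s.length + 1) s (i + (tc :: tr).length) < s.length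
            · simp only [dif_pos hj]
              by_cases hbr : (s[pvSkipWs (s.length + 1) s (i + (tc :: tr).length)]'hj) = '{'
              · simp only [if_pos hbr]
                have hkge := pvBraceScan_ge (s.length + 1) s
                  (pvSkipWs (s.length + 1) s (i + (tc :: tr).length)) 0
                by_cases hok : (pvBraceScan (s.length + 1) s (pvSkipWs (s.length + 1) s (i + (tc :: tr).length)) 0).1 < s.length ∧
                    (pvBraceScan (s.length + 1) s (pvSkipWs (s.length + 1) s (i + (tc :: tr).length)) 0).2 = 0
                · simp only [if_pos hok]
                  congr 1
                  exact ih m _ (by omega) (by omega)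
                · simp only [if_neg hok]
                  congr 1
                  exact ih m _ (by omega) (by omega)
              · simp only [if_neg hbr]
                congr 1
                exact ih m _ (by omega) (by omega)
            · simp only [dif_neg hj]
              congr 1
              exact ih m _ (by omega) (by omega)
          · simp only [if_neg hsw]
            congr 1
            exact ih m _ (by omega) (by omega)
        · simp only [dif_neg hi]

-- A's scan when no token occurrence remains: it copies the tail verbatim
theorem pvUnwrapA_no_match (s : List Char) (tc : Char) (tr : List Char) :
    ∀ n i, s.length - i < n → ¬ (tc :: tr) <:+: s.drop i →
      pvUnwrapA n s tc tr i = s.drop i := by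
  intro n
  induction n with
  | zero => intro i h _; omega
  | succ n ih =>
      intro i h1 h2
      by_cases hi : i < s.length
      · have hsw : ¬ PySem.Chars.startswith (s.drop i) (tc :: tr) = true := by
          intro h; exact h2 ((PySem.Chars.startswith_iff _ _).1 h).isInfix
        have hdrop : s.drop i = s[i] :: s.drop (i + 1) := List.drop_eq_getElem_cons hi
        have h2' : ¬ (tc :: tr) <:+: s.drop (i + 1) := by
          intro h
          exact h2 (h.trans (by rw [hdrop]; exact (List.suffix_cons _ _).isInfix))
        rw [pvUnwrapA, dif_pos hi, if_neg hsw]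
        rw [ih (i + 1) (by omega) h2', hdrop]
      · rw [pvUnwrapA, dif_neg hi]
        exact (List.drop_eq_nil_iff.2 (by omega)).symm

-- A's scan up to the first occurrence at m: it copies s[i:m] verbatim
theorem pvUnwrapA_skip (s : List Char) (tc : Char) (tr : List Char) :
    ∀ d n i m, m - i ≤ d → i ≤ m → m ≤ s.length → s.length - i < n →
      (∀ q, i ≤ q → q < m → ¬ (tc :: tr) <+: s.drop q) →
      pvUnwrapA n s tc tr i = (s.drop i).take (m - i) ++ pvUnwrapA n s tc tr m := by
  intro d
  induction d with
  | zero =>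
      intro n i m h1 h2 _ _ _
      have : i = m := by omega
      subst this; simp
  | succ d ih =>
      intro n i m h1 h2 h3 hn h4
      rcases Nat.eq_or_lt_of_le h2 with h | h
      · subst h; simp
      · have hi : i < s.length := by omega
        cases n with
        | zero => omega
        | succ n =>
          have hsw : ¬ PySem.Chars.startswith (s.drop i) (tc :: tr) = true := by
            intro hh; exact h4 i le_rfl h ((PySem.Chars.startswith_iff _ _).1 hh)
          have hdrop : s.drop i = s[i] :: s.drop (i + 1) := List.drop_eq_getElem_cons hi
          rw [pvUnwrapA, dif_pos hi, if_neg hsw]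
          rw [ih n (i + 1) m (by omega) (by omega) h3 (by omega)
                (fun q hq1 hq2 => h4 q (by omega) hq2)]
          rw [pvUnwrapA_congr s tc tr n (n + 1) m (by omega) (by omega)]
          rw [hdrop]
          have : m - i = (m - (i + 1)) + 1 := by omega
          rw [this, List.take_succ_cons]
          simp

-- main equivalence: A's char-by-char loop equals B's find-and-jump loop
theorem pvMain (s : List Char) (tc : Char) (tr : List Char) :
    ∀ n i, i ≤ s.length → s.length - i < n →
      pvUnwrapA n s tc tr i = pvUnwrapB n s tc tr i := by
  intro n
  induction n with
  | zero => intro i _ h; omega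
  | succ n ih =>
      intro i hi hn
      rw [pvUnwrapB]
      have hff := PySem.Chars.findFrom_natCast s (tc :: tr) i hi
      by_cases hf : PySem.Chars.find (s.drop i) (tc :: tr) = -1
      · -- no occurrence: A copies the tail
        have hp : PySem.Chars.findFrom s (tc :: tr) (i : Int) none < 0 := by
          rw [hff, if_pos hf]; norm_num
        rw [if_pos hp]
        exact pvUnwrapA_no_match s tc tr (n + 1) i hn
          ((PySem.Chars.find_eq_neg_one_iff _ _).1 hf)
      · -- occurrence at i + fN
        have hfge : 0 ≤ PySem.Chars.find (s.drop i) (tc :: tr) := by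
          have := PySem.Chars.neg_one_le_find (s.drop i) (tc :: tr)
          omega
        have hpval : PySem.Chars.findFrom s (tc :: tr) (i : Int) none
            = (i : Int) + PySem.Chars.find (s.drop i) (tc :: tr) := by
          rw [hff, if_neg hf]
        have hp : ¬ PySem.Chars.findFrom s (tc :: tr) (i : Int) none < 0 := by
          rw [hpval]; omega
        rw [if_neg hp]
        obtain ⟨hpre, hmin⟩ := PySem.Chars.find_spec (s := s.drop i) (sub := tc :: tr) hfge
        set fN := (PySem.Chars.find (s.drop i) (tc :: tr)).toNat with hfN
        have hpn : (PySem.Chars.findFrom s (tc :: tr) (i : Int) none).toNat = i + fN := by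
          rw [hpval]; simp only [hfN]; omega
        simp only [hpn]
        have hpre' : (tc :: tr) <+: s.drop (i + fN) := by
          rwa [List.drop_drop] at hpre
        have hlen : i + fN + (tc :: tr).length ≤ s.length := by
          have := hpre'.length_le
          rw [List.length_drop] at this
          simp only [List.length_cons] at this ⊢
          omega
        have hpnlt : i + fN < s.length := by
          simp only [List.length_cons] at hlen; omega
        -- A copies verbatim up to i + fN
        have hA := pvUnwrapA_skip s tc tr fN (n + 1) i (i + fN) (by omega) (by omega) (by omega) hn
          (fun q hq1 hq2 => by
            have h' := hmin (q - i) (by omega)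
            rw [List.drop_drop] at h'
            rwa [(by omega : i + (q - i) = q)] at h')
        rw [hA, Nat.add_sub_cancel_left]
        congr 1
        -- now expand A at i + fN : it sees the token there
        have hsw : PySem.Chars.startswith (s.drop (i + fN)) (tc :: tr) = true :=
          (PySem.Chars.startswith_iff _ _).2 hpre'
        rw [pvUnwrapA, dif_pos hpnlt, if_pos hsw]
        have hjge := pvSkipWs_ge (s.length + 1) s (i + fN + (tc :: tr).length)
        have htl : 1 ≤ (tc :: tr).length := by simp
        -- case split on the whitespace/brace branches (identical in both loops)
        by_cases hj : pvSkipWs (s.length + 1) s (i + fN + (tc :: tr).length) < s.length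
        · by_cases hbr : (s[pvSkipWs (s.length + 1) s (i + fN + (tc :: tr).length)]'hj) = '{'
          · simp only [dif_pos hj, if_pos hbr,
              pvMatchBrace_eq (s.length + 1) s (pvSkipWs (s.length + 1) s (i + fN + (tc :: tr).length)) 0 (by omega)]
            by_cases hok : (pvBraceScan (s.length + 1) s (pvSkipWs (s.length + 1) s (i + fN + (tc :: tr).length)) 0).1 < s.length ∧
                (pvBraceScan (s.length + 1) s (pvSkipWs (s.length + 1) s (i + fN + (tc :: tr).length)) 0).2 = 0
            · have hkge := pvBraceScan_ge (s.length + 1) s (pvSkipWs (s.length + 1) s (i + fN + (tc :: tr).length)) 0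
              simp only [if_pos hok]
              congr 1
              exact ih ((pvBraceScan (s.length + 1) s (pvSkipWs (s.length + 1) s (i + fN + (tc :: tr).length)) 0).1 + 1)
                (by omega) (by omega)
            · simp only [if_neg hok]
              congr 1
              exact ih (i + fN + (tc :: tr).length) (by omega) (by omega)
          · simp only [dif_pos hj, if_neg hbr]
            congr 1
            exact ih (i + fN + (tc :: tr).length) (by omega) (by omega)
        · simp only [dif_neg hj]
          congr 1
          exact ih (i + fN + (tc :: tr).length) (by omega) (by omega)

-- ===== VERDICT (by name: the statement is the Claim_ definition above) =====
theorem unwrap_macro_block_py_spec : Claim_equal_unwrap_macro_block_py := by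
  intro expr macro_ _
  show unwrap_macro_block_py expr macro_ = unwrap_macro_block_py_alt expr macro_
  unfold unwrap_macro_block_py unwrap_macro_block_py_alt
  congr 1
  exact pvMain expr.toList '\\' macro_.toList (expr.toList.length + 1) 0 (by omega) (by omega)
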